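-- pv_equiv track=rewrite | github.com/R1chrdson/brutezip | bruteforce.py | calculate
-- ===== SOURCE A (Python) =====
-- def calculate(password, symbols):
--     l = len(password)
--     d = len(symbols)
--     result = 1
--     for i in range(1, l):
--         result += d**i
--     for i in range(l - 1, -1, -1):
--         result += (d**i)*symbols.find(password[0])
--         password = password[1:]
--     return result
-- ===== SOURCE B (Python) =====
-- def calculate(password, symbols):
--     # index of `password` in brute-force enumeration order over `symbols`:
--     # Horner-evaluated digit value plus a closed-form count of all shorter candidates.
--     if not password:
--         return 1
--     d = len(symbols)
--     idx = 0
--     for c in password: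
--         idx = idx * d + symbols.find(c)
--     if d > 1:
--         prefix = (d ** len(password) - d) // (d - 1) + 1
--     elif d == 1:
--         prefix = len(password)
--     else:
--         prefix = 1
--     return prefix + idx
-- ===== Notes on version B (the rewrite author's own statement) =====
-- stated objective: faster
-- what changed: Replaces the O(l) d**i power loop and the per-character string slicing/indexing loop by a single Horner pass over the characters plus a closed-form geometric-sum for the count of shorter candidates.
import Mathlib
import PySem

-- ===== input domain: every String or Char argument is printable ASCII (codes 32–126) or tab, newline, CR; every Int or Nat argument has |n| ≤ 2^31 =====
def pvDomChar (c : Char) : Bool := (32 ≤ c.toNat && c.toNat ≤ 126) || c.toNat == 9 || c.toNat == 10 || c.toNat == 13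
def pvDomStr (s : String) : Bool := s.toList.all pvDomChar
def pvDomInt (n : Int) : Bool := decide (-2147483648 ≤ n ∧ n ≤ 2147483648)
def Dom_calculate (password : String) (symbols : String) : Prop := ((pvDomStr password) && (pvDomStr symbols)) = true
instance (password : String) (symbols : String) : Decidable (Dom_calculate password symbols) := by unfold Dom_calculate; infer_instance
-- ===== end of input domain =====

-- B replaces A's per-position d**i power loop and per-character string slicing by one
-- Horner pass plus a closed-form geometric sum (faster); the theorem proves equality.

-- ===== PORT A =====
-- literal port: first loop sums d**i for i in range(1, l); the second loop walks
-- i = l-1 … 0 carrying the shrinking string, reading password[0] and slicing password[1:]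
-- (index 0 is always in range when the loop body runs, so the Option is always `some`).
def calculate (password : String) (symbols : String) : Int :=
  let l : Int := PySem.Str.len password
  let d : Int := PySem.Str.len symbols
  let result : Int := 1
  let result := (PySem.List.pyRange 1 l 1).foldl (fun r i => r + d ^ i.toNat) result
  let st := (PySem.List.pyRange (l - 1) (-1) (-1)).foldl
    (fun (st : Int × List Char) (i : Int) =>
      (st.1 + d ^ i.toNat * PySem.Chars.find symbols.toList (PySem.List.pyGet? st.2 0).toList,
       PySem.List.slice st.2 (some 1) none))
    (result, password.toList)
  st.1

-- ===== PORT B =====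
def calculate_alt (password : String) (symbols : String) : Int :=
  if PySem.Str.len password = 0 then 1
  else
    let d : Int := PySem.Str.len symbols
    let idx : Int := password.toList.foldl
      (fun a c => a * d + PySem.Chars.find symbols.toList [c]) 0
    let pre : Int :=
      if 1 < d then PySem.Int.floordiv (d ^ (PySem.Str.len password).toNat - d) (d - 1) + 1
      else if d = 1 then PySem.Str.len password
      else 1
    pre + idx

-- ===== PRECONDITION & SPEC =====
def Spec_calculate (password : String) (symbols : String) (out : Int) : Prop := out = calculate_alt password symbols
instance (password : String) (symbols : String) (out : Int) : Decidable (Spec_calculate password symbols out) := by unfold Spec_calculate; infer_instance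

-- ===== CLAIM (what is proved, stated in full; the proofs are below) =====
def Claim_equal_calculate : Prop := ∀ (password : String) (symbols : String), Dom_calculate password symbols → Spec_calculate password symbols (calculate password symbols)

-- ===== LEMMAS AND PROOFS =====

-- B's Horner accumulator (the inner fold of calculate_alt, with symbols and d fixed)
def pwH (sy : List Char) (d : Int) (cs : List Char) (a : Int) : Int :=
  cs.foldl (fun a c => a * d + PySem.Chars.find sy [c]) a

lemma pwH_shift (sy : List Char) (d : Int) (cs : List Char) (a : Int) :
    pwH sy d cs a = a * d ^ cs.length + pwH sy d cs 0 := by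
  induction cs generalizing a with
  | nil => simp [pwH]
  | cons c cs ih =>
    have h1 : pwH sy d (c :: cs) a
        = pwH sy d cs (a * d + PySem.Chars.find sy [c]) := rfl
    have h2 : pwH sy d (c :: cs) 0
        = pwH sy d cs (0 * d + PySem.Chars.find sy [c]) := rfl
    rw [h1, h2, ih, ih (0 * d + PySem.Chars.find sy [c])]
    simp [pow_succ]
    ring

-- a step -1 range unrolls from the top
lemma pyRange_down_cons (k : Int) (h : 0 ≤ k) :
    PySem.List.pyRange k (-1) (-1) = k :: PySem.List.pyRange (k - 1) (-1) (-1) := by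
  simp only [PySem.List.pyRange]
  norm_num
  have h1 : -1 < k := by omega
  have h2 : (k + 1).toNat = k.toNat + 1 := by omega
  have h3 : (if 0 < k then k.toNat else 0) = k.toNat := by split_ifs <;> omega
  rw [if_pos h1, h2, h3, List.range_succ_eq_map, List.map_cons, List.map_map]
  refine List.cons_eq_cons.mpr ⟨by simp, ?_⟩
  apply List.map_congr_left
  intro j hj
  simp [Function.comp]
  omega

lemma pyRange_down_neg : PySem.List.pyRange (-1) (-1) (-1) = [] := by decide

-- A's second loop over the shrinking character list
lemma Aloop (sy : List Char) (d : Int) (cs : List Char) : ∀ (r : Int),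
    ((PySem.List.pyRange ((cs.length : Int) - 1) (-1) (-1)).foldl
      (fun (st : Int × List Char) (i : Int) =>
        (st.1 + d ^ i.toNat * PySem.Chars.find sy (PySem.List.pyGet? st.2 0).toList,
         PySem.List.slice st.2 (some 1) none))
      (r, cs)).1 = r + pwH sy d cs 0 := by
  induction cs with
  | nil =>
    intro r
    rw [(by norm_num : ((([]:List Char).length : Int) - 1) = -1), pyRange_down_neg]
    simp [pwH]
  | cons c cs ih =>
    intro r
    have hlen : (((c :: cs).length : Int) - 1) = (cs.length : Int) := by
      simp only [List.length_cons]
      omega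
    have hget : (PySem.List.pyGet? (c :: cs) 0).toList = [c] := by
      simp [PySem.List.pyGet?, PySem.List.pyIdx?]
    have hslice : PySem.List.slice (c :: cs) (some 1) none = cs := by
      simp [PySem.List.slice]
    rw [hlen, pyRange_down_cons _ (Int.natCast_nonneg _), List.foldl_cons]
    simp only [hget, hslice, Int.toNat_natCast]
    rw [ih (r + d ^ cs.length * PySem.Chars.find sy [c])]
    have h3 : pwH sy d (c :: cs) 0
        = PySem.Chars.find sy [c] * d ^ cs.length + pwH sy d cs 0 := by
      have h2 : pwH sy d (c :: cs) 0
          = pwH sy d cs (0 * d + PySem.Chars.find sy [c]) := rfl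
      rw [h2, pwH_shift sy d cs (0 * d + PySem.Chars.find sy [c])]
      ring
    rw [h3]
    ring

-- A's first loop produces the full geometric sum ∑_{i<n} d^i once n ≥ 1
lemma Afirst (d : Int) (n : Nat) (hn : 1 ≤ n) :
    (PySem.List.pyRange 1 (n : Int) 1).foldl (fun r i => r + d ^ i.toNat) 1
      = ∑ i ∈ Finset.range n, d ^ i := by
  induction n with
  | zero => omega
  | succ m ih =>
    rcases Nat.eq_zero_or_pos m with h0 | h0
    · subst h0
      have he : PySem.List.pyRange 1 ((0 + 1 : Nat) : Int) 1 = [] := by decide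
      rw [he]
      simp
  
    · have hr : PySem.List.pyRange 1 ((m + 1 : Nat) : Int) 1
          = PySem.List.pyRange 1 (m : Int) 1 ++ [(m : Int)] := by
        have h := PySem.List.pyRange_one_succ_right
          (a := 1) (b := (m : Int)) (by exact_mod_cast h0)
        rw [← h]
        norm_num
      rw [hr, List.foldl_append, ih h0, Finset.sum_range_succ]
      simp
    
lemma geom_closed (d : Int) (hd : 1 < d) (n : Nat) :
    PySem.Int.floordiv (d ^ n - d) (d - 1)
      = (∑ i ∈ Finset.range n, d ^ i) - 1 := by
  have hpos : (0:Int) < d - 1 := by omega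
  have key : ((∑ i ∈ Finset.range n, d ^ i) - 1) * (d - 1) = d ^ n - d := by
    have h := geom_sum_mul d n
    linarith
  rw [← key, PySem.Int.floordiv_eq_ediv_of_pos hpos,
    Int.mul_ediv_cancel _ (by omega : d - 1 ≠ 0)]

-- ===== VERDICT (by name: the statement is the Claim_ definition above) =====
theorem calculate_spec : Claim_equal_calculate := by
  intro password symbols _
  unfold Spec_calculate
  simp only [calculate, calculate_alt]
  have hlenp : PySem.Str.len password = (password.toList.length : Int) :=
    PySem.Str.len_eq password
  rcases hcs : password.toList with _ | ⟨c, cs⟩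
  · -- empty password: both sides are 1
    rw [hlenp, hcs]
    norm_num [PySem.List.pyRange, pyRange_down_neg]
  · -- nonempty password
    have hne : ¬ PySem.Str.len password = 0 := by rw [hlenp, hcs]; simp; omega
    rw [if_neg hne, hlenp, hcs]
    set d : Int := PySem.Str.len symbols with hd
    rw [Aloop symbols.toList d (c :: cs)]
    rw [Afirst d (c :: cs).length (by simp)]
    have hidx : (c :: cs).foldl
        (fun a c => a * d + PySem.Chars.find symbols.toList [c]) 0
        = pwH symbols.toList d (c :: cs) 0 := rfl
    rw [hidx]
    rcases lt_trichotomy d 1 with h1 | h1 | h1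
    · -- d = 0: the geometric sum collapses to 1
      have hd0 : 0 ≤ d := by rw [hd, PySem.Str.len_eq]; positivity
      have hdz : d = 0 := by omega
      rw [if_neg (by omega), if_neg (by omega), hdz]
      have hone : (∑ i ∈ Finset.range (c :: cs).length, (0:Int) ^ i) = 1 := by
        simp only [List.length_cons]
        rw [Finset.sum_range_succ']
        simp
      rw [hone]
    · -- d = 1: the geometric sum is the length
      rw [if_neg (by omega), if_pos h1, h1]
      simp
    · -- d ≥ 2: closed form
      rw [if_pos h1]
      have hnn : (((c :: cs).length : Int)).toNat = (c :: cs).length :=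
        Int.toNat_natCast _
      rw [hnn, geom_closed d h1]
      ring
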